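-- pv_equiv track=rewrite | github.com/kento1109/radie | src/utils/wrapper.py | _create_group_idx_list
-- ===== SOURCE A (Python) =====
-- from typing import List, Union, Tuple
--
-- SENT_HEAD_MAP = {'head': 0, 'not_head': 1}
--
-- def _create_group_idx_list(heads_list: List[int]) -> List[int]:
--     group_list = list()
--     idx = -1
--     for head in heads_list:
--         if head == SENT_HEAD_MAP['head']:
--             idx += 1
--             group_list.append(idx)
--         else:
--             group_list.append(idx)
--     return group_list
-- ===== SOURCE B (Python) =====
-- SENT_HEAD_MAP = {'head': 0, 'not_head': 1}
--
-- def _create_group_idx_list(heads_list):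
--     # Collect the positions of the head markers, then emit the answer as runs:
--     # a run of -1 before the first head, then for each consecutive pair of
--     # bounds (head position -> next head position / end) a run of the group index.
--     n = len(heads_list)
--     positions = [i for i, h in enumerate(heads_list) if h == SENT_HEAD_MAP['head']]
--     bounds = positions + [n]
--     out = [-1] * bounds[0]
--     for k, (p, q) in enumerate(zip(bounds, bounds[1:])):
--         out += [k] * (q - p)
--     return out
-- ===== Notes on version B (the rewrite author's own statement) =====
-- stated objective: alternative
-- what changed: Replaces the single-pass running-counter loop with a run-length construction: first collect the positions of head markers, then emit a -1 run up to the first head and, for each consecutive pair of bounds, a run of that group index.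
import Mathlib
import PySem

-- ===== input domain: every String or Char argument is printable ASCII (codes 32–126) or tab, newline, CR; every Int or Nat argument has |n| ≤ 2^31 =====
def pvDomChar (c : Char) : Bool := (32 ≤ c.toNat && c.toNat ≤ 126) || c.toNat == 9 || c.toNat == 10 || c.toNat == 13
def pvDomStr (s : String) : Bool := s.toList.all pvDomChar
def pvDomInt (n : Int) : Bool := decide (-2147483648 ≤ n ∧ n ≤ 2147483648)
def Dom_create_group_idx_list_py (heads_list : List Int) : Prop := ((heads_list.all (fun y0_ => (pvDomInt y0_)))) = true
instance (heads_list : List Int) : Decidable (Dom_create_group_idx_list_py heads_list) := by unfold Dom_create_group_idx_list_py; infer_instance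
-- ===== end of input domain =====

-- B replaces A's running-counter loop by collecting head positions and emitting
-- runs between consecutive bounds (alternative decomposition, same O(n) cost).


-- ===== PORT A =====
-- A's for-loop over heads_list with state (group_list, idx), idx starting at -1;
-- SENT_HEAD_MAP['head'] = 0 is inlined.
def create_group_idx_list_py (heads_list : List Int) : List Int :=
  (heads_list.foldl
    (fun st head =>
      if head == 0 then (st.1 ++ [st.2 + 1], st.2 + 1) else (st.1 ++ [st.2], st.2))
    (([] : List Int), (-1 : Int))).1

-- ===== PORT B =====
-- positions = [i for i, h in enumerate(heads_list) if h == 0]; bounds = positions + [n];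
-- out = [-1]*bounds[0]; then for k,(p,q) in enumerate(zip(bounds, bounds[1:])): out += [k]*(q-p)
def create_group_idx_list_py_alt (heads_list : List Int) : List Int :=
  let n : Int := heads_list.length
  let positions : List Int :=
    ((PySem.List.enumerate heads_list 0).filter (fun pr => pr.2 == 0)).map Prod.fst
  let bounds : List Int := positions ++ [n]
  -- bounds[0]: bounds is nonempty, so headD 0 is exact
  let out0 : List Int := PySem.List.pyRepeat [(-1 : Int)] (bounds.headD 0)
  (PySem.List.enumerate (bounds.zip bounds.tail) 0).foldl
    (fun out kpq => out ++ PySem.List.pyRepeat [kpq.1] (kpq.2.2 - kpq.2.1)) out0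

-- ===== PRECONDITION & SPEC =====
def Spec_create_group_idx_list_py (heads_list : List Int) (out : List Int) : Prop := out = create_group_idx_list_py_alt heads_list
instance (heads_list : List Int) (out : List Int) : Decidable (Spec_create_group_idx_list_py heads_list out) := by unfold Spec_create_group_idx_list_py; infer_instance

-- ===== CLAIM (what is proved, stated in full; the proofs are below) =====
def Claim_equal_create_group_idx_list_py : Prop := ∀ (heads_list : List Int), Dom_create_group_idx_list_py heads_list → Spec_create_group_idx_list_py heads_list (create_group_idx_list_py heads_list)

-- ===== LEMMAS AND PROOFS =====

-- recursive form of A's loop (proof-side helper)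
def agLoop (hs : List Int) (idx : Int) : List Int :=
  match hs with
  | [] => []
  | h :: t => if h == 0 then (idx + 1) :: agLoop t (idx + 1) else idx :: agLoop t idx

theorem aFoldl_eq (hs : List Int) (acc : List Int) (idx : Int) :
    (hs.foldl
      (fun st head =>
        if head == 0 then (st.1 ++ [st.2 + 1], st.2 + 1) else (st.1 ++ [st.2], st.2))
      (acc, idx)).1 = acc ++ agLoop hs idx := by
  induction hs generalizing acc idx with
  | nil => simp [agLoop]
  | cons h t ih =>
    by_cases hh : h = 0
    · rw [List.foldl_cons, if_pos (show (h == 0) = true by simp [hh]), ih]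
      simp [agLoop, hh]
    · rw [List.foldl_cons, if_neg (show ¬ (h == 0) = true by simp [hh]), ih]
      simp [agLoop, hh]

-- recursive run emitter over the bounds list (proof-side helper)
def bRuns (bs : List Int) (g : Int) : List Int :=
  match bs with
  | p :: q :: rest => List.replicate (q - p).toNat g ++ bRuns (q :: rest) (g + 1)
  | _ => []

-- B's fold over enumerate(zip(bounds, bounds[1:])) is exactly bRuns
theorem bFoldl_eq (bs : List Int) (acc : List Int) (s : Int) :
    (PySem.List.enumerate (bs.zip bs.tail) s).foldl
      (fun out kpq => out ++ PySem.List.pyRepeat [kpq.1] (kpq.2.2 - kpq.2.1)) acc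
      = acc ++ bRuns bs s := by
  induction bs generalizing acc s with
  | nil => simp [bRuns]
  | cons p t ih =>
    cases t with
    | nil => simp [bRuns]
    | cons q rest =>
      simp only [List.tail_cons, List.zip_cons_cons, PySem.List.enumerate_cons,
        List.foldl_cons]
      rw [show ((q :: rest).zip rest) = ((q :: rest).zip (q :: rest).tail) from rfl, ih]
      simp [bRuns, PySem.List.pyRepeat_singleton, List.append_assoc]

-- positions with an arbitrary enumerate start
def posFrom (hs : List Int) (s : Int) : List Int :=
  ((PySem.List.enumerate hs s).filter (fun pr => pr.2 == 0)).map Prod.fst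

theorem posFrom_nil (s : Int) : posFrom [] s = [] := by
  simp [posFrom, PySem.List.enumerate]

theorem posFrom_cons (a : Int) (t : List Int) (s : Int) :
    posFrom (a :: t) s = (if a == 0 then [s] else []) ++ posFrom t (s + 1) := by
  by_cases hh : a == 0 <;> simp [posFrom, PySem.List.enumerate_cons, hh]

theorem posFrom_ge (hs : List Int) (s : Int) : ∀ x ∈ posFrom hs s, s ≤ x := by
  intro x hx
  simp only [posFrom, List.mem_map, List.mem_filter] at hx
  obtain ⟨pr, ⟨hmem, _⟩, hfst⟩ := hx
  rw [PySem.List.mem_enumerate_iff] at hmem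
  obtain ⟨k, hk, rfl⟩ := hmem
  simp at hfst
  omega

theorem head_ge (hs : List Int) (s : Int) :
    s ≤ (posFrom hs s ++ [s + hs.length]).headD 0 := by
  cases h : posFrom hs s with
  | nil =>
    simp only [List.nil_append, List.headD_cons]
    omega
  | cons x t =>
    have hx : x ∈ posFrom hs s := by rw [h]; exact List.mem_cons_self
    have := posFrom_ge hs s x hx
    simp only [List.cons_append, List.headD_cons]
    exact this

-- main invariant: A's loop equals the run construction from positions
theorem main_inv (hs : List Int) (g s : Int) :
    agLoop hs g =
      List.replicate ((posFrom hs s ++ [s + hs.length]).headD 0 - s).toNat g ++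
        bRuns (posFrom hs s ++ [s + hs.length]) (g + 1) := by
  induction hs generalizing g s with
  | nil => simp [agLoop, posFrom_nil, bRuns]
  | cons a t ih =>
    have hb : posFrom (a :: t) s ++ [s + ((a :: t).length : Int)]
        = (if a == 0 then [s] else []) ++ (posFrom t (s + 1) ++ [(s + 1) + (t.length : Int)]) := by
      rw [posFrom_cons]
      simp only [List.append_assoc, List.length_cons]
      congr 3
      push_cast
      omega
    rw [hb]
    have hrest : posFrom t (s + 1) ++ [(s + 1) + (t.length : Int)] ≠ [] := by simp
    obtain ⟨r0, rest', hr⟩ := List.exists_cons_of_ne_nil hrest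
    have hr0ge : s + 1 ≤ r0 := by
      have := head_ge t (s + 1)
      rw [hr] at this; simpa using this
    rw [hr]
    by_cases ha : a = 0
    · -- head marker: bounds = s :: r0 :: rest'
      have hloop : agLoop (a :: t) g = (g + 1) :: agLoop t (g + 1) := by
        simp [agLoop, ha]
      rw [hloop, ih (g + 1) (s + 1), hr]
      simp only [ha, beq_self_eq_true, if_true, List.cons_append, List.nil_append,
        List.headD_cons, bRuns]
      have h0 : (s - s).toNat = 0 := by omega
      have h1 : (r0 - s).toNat = (r0 - (s + 1)).toNat + 1 := by omega
      rw [h0, h1, List.replicate_succ]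
      simp
    · -- not a head: one extra g at the front, bounds unchanged
      have hloop : agLoop (a :: t) g = g :: agLoop t g := by
        simp [agLoop, ha]
      rw [hloop, ih g (s + 1), hr]
      have hane : (a == 0) = false := by simp [ha]
      have h1 : (r0 - s).toNat = (r0 - (s + 1)).toNat + 1 := by omega
      simp [hane, h1, List.replicate_succ]

-- ===== VERDICT (by name: the statement is the Claim_ definition above) =====
theorem create_group_idx_list_py_spec : Claim_equal_create_group_idx_list_py := by
  intro hs _
  unfold Spec_create_group_idx_list_py create_group_idx_list_py create_group_idx_list_py_alt
  rw [aFoldl_eq hs [] (-1), List.nil_append, bFoldl_eq]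
  have hmain := main_inv hs (-1) 0
  rw [show posFrom hs 0
        = ((PySem.List.enumerate hs 0).filter (fun pr => pr.2 == 0)).map Prod.fst from rfl,
      show ((0 : Int) + (hs.length : Int)) = (hs.length : Int) by omega] at hmain
  rw [hmain, PySem.List.pyRepeat_singleton]
  congr 2
  omega
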